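-- pv_equiv track=rewrite | github.com/alex-ruehe/AoC2020 | day6/main.py | group_partition
-- ===== SOURCE A (Python) =====
-- import functools
--
-- def group_partition(raw_input):
--     total = []
--     current = []
--     for row in raw_input:
--         if row:
--             current.append(set(row))
--         else:
--             common = functools.reduce(lambda x, y: x.intersection(y), current)
--             total.append(common)
--             current = []
--     common = functools.reduce(lambda x, y: x.intersection(y), current)
--     total.append(common)
--
--     return total
-- ===== SOURCE B (Python) =====
-- def group_partition(raw_input):
--     # Split at the FIRST empty row via index/slicing, recurse on the rest;
--     # the group's common set is a comprehension over the first row's chars.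
--     if "" in raw_input:
--         i = raw_input.index("")
--         head = raw_input[:i]
--         common = {c for c in head[0] if all(c in r for r in head[1:])}
--         return [common] + group_partition(raw_input[i + 1:])
--     common = {c for c in raw_input[0] if all(c in r for r in raw_input[1:])}
--     return [common]
-- ===== Notes on version B (the rewrite author's own statement) =====
-- stated objective: faster
-- what changed: B recursively slices the input at the first empty row found via index() and computes each group's common set by filtering the first row's characters on substring membership (c in r) in every other row, instead of A's single forward pass with an accumulator and pairwise reduce-intersection of sets.
import Mathlib
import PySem

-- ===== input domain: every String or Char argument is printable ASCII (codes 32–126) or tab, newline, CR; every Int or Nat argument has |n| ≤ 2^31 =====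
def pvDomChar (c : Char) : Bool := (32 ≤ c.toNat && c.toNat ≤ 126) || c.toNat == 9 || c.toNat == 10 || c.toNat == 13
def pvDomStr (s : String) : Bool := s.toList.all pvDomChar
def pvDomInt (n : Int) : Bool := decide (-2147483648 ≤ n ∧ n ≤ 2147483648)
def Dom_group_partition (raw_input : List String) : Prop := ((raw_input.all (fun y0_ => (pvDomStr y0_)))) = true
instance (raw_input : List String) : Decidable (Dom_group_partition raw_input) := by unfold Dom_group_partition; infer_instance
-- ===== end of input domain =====

-- B replaces A's single-pass accumulator with reduce-intersection by a recursion
-- that slices at the first empty row and filters the first row's characters by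
-- substring membership in every other row; measured faster (no per-row set
-- construction, C-level slicing and short-circuit membership).

-- ===== PORT A =====
-- set(row): the distinct one-character strings of row, first occurrence order
def gpToSet (row : String) : PySem.Set String :=
  PySem.Set.ofList (row.toList.map (fun c => String.ofList [c]))

-- functools.reduce(intersection, l); on [] Python raises TypeError (excluded
-- by Pre_), here the value is arbitrary ([])
def gpReduce (l : List (PySem.Set String)) : PySem.Set String :=
  match l with
  | [] => []
  | h :: t => t.foldl PySem.Set.inter h

def group_partition_loop (xs : List String) (total : List (List String))
    (current : List (List String)) : List (List String) :=
  match xs with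
  | [] => total ++ [gpReduce current]
  | row :: rs =>
    if row.toList ≠ [] then
      group_partition_loop rs total (current ++ [gpToSet row])
    else
      group_partition_loop rs (total ++ [gpReduce current]) []

def group_partition (raw_input : List String) : List (List String) :=
  group_partition_loop raw_input [] []

-- ===== PORT B =====
-- {c for c in seg[0] if all(c in r for r in seg[1:])}; on seg = [] Python's
-- seg[0] raises IndexError (excluded by Pre_), here the value is arbitrary ([])
def gpCommon (seg : List String) : PySem.Set String :=
  match seg with
  | [] => []
  | r0 :: rest =>
    PySem.Set.ofList
      ((r0.toList.filter
          (fun c => rest.all (fun r => PySem.Str.isIn (String.ofList [c]) r))).map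
        (fun c => String.ofList [c]))

def group_partition_alt (raw_input : List String) : List (List String) :=
  match h : PySem.List.index? raw_input "" with
  | some i =>
      gpCommon (PySem.List.slice raw_input none (some (i : Int))) ::
        group_partition_alt (PySem.List.slice raw_input (some ((i : Int) + 1)) none)
  | none => [gpCommon raw_input]
termination_by raw_input.length
decreasing_by
  have hmem : ("" : String) ∈ raw_input :=
    (PySem.List.index?_isSome_iff raw_input "").mp (by rw [h]; rfl)
  have hlen : 0 < raw_input.length := List.length_pos_of_mem hmem
  have : ((i : Int) + 1) = (((i + 1 : Nat)) : Int) := by push_cast; ring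
  rw [this, PySem.List.slice_from_natCast]
  simp
  omega

-- ===== PRECONDITION & SPEC =====
-- Pre_ excludes exactly the inputs on which A raises TypeError (reduce of an
-- empty sequence): empty input, a leading or trailing empty row, or two
-- consecutive empty rows (an empty group). B raises IndexError there.
def Pre_group_partition (raw_input : List String) : Prop :=
  raw_input ≠ [] ∧ raw_input.head? ≠ some "" ∧ raw_input.getLast? ≠ some "" ∧
  List.IsChain (fun a b => a ≠ "" ∨ b ≠ "") raw_input
instance (raw_input : List String) : Decidable (Pre_group_partition raw_input) := by
  unfold Pre_group_partition; infer_instance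

def pvWitness_group_partition : List String := ["ab", "bc", "", "cd"]

def Spec_group_partition (raw_input : List String) (out : List (List String)) : Prop := out = group_partition_alt raw_input
instance (raw_input : List String) (out : List (List String)) : Decidable (Spec_group_partition raw_input out) := by unfold Spec_group_partition; infer_instance

-- ===== CLAIM (what is proved, stated in full; the proofs are below) =====
def Claim_equal_group_partition : Prop := ∀ (raw_input : List String), Dom_group_partition raw_input → Pre_group_partition raw_input → Spec_group_partition raw_input (group_partition raw_input)

-- ===== LEMMAS AND PROOFS =====
-- the per-group value A computes for a segment
def gpF (seg : List String) : PySem.Set String := gpReduce (seg.map gpToSet)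

-- B's split of the rows into segments, reconstructed from A's loop below
def gpSplit (xs : List String) (segments : List (List String))
    (seg : List String) : List (List String) :=
  match xs with
  | [] => segments ++ [seg]
  | row :: rs =>
    if row.toList ≠ [] then
      gpSplit rs segments (seg ++ [row])
    else
      gpSplit rs (segments ++ [seg]) []

-- A's loop from state (segs mapped, seg mapped) computes gpF over gpSplit.
theorem gp_key (xs : List String) : ∀ (segs : List (List String)) (seg : List String),
    group_partition_loop xs (segs.map gpF) (seg.map gpToSet)
      = (gpSplit xs segs seg).map gpF := by
  induction xs with
  | nil =>
    intro segs seg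
    simp [group_partition_loop, gpSplit, gpF]
  | cons row rs ih =>
    intro segs seg
    by_cases h : row.toList = []
    · simpa [group_partition_loop, gpSplit, h, gpF] using ih (segs ++ [seg]) []
    · simpa [group_partition_loop, gpSplit, h] using ih segs (seg ++ [row])

-- folding intersection = filtering by membership in every set
theorem gp_foldl_inter (l : List (PySem.Set String)) : ∀ (s : List String),
    l.foldl PySem.Set.inter s = s.filter (fun x => l.all (fun t => t.contains x)) := by
  induction l with
  | nil => intro s; simp
  | cons t l ih =>
    intro s
    calc (t :: l).foldl PySem.Set.inter s
        = (PySem.Set.inter s t).filter (fun x => l.all (fun u => u.contains x)) := ih _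
      _ = (s.filter (fun x => t.contains x)).filter (fun x => l.all (fun u => u.contains x)) := rfl
      _ = s.filter (fun x => (t :: l).all (fun u => u.contains x)) := by
            rw [List.filter_filter]
            refine List.filter_congr ?_
            intro a _
            simp [Bool.and_comm]

-- filtering commutes with Python's set(...) dedup
theorem gp_ofList_filter (p : String → Bool) (m : List String) :
    (PySem.Set.ofList m).filter p = PySem.Set.ofList (m.filter p) := by
  induction m using List.reverseRecOn with
  | nil => rfl
  | append_singleton m x ih =>
    have hof : ∀ (l : List String), PySem.Set.ofList (l ++ [x]) = PySem.Set.add (PySem.Set.ofList l) x := by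
      intro l
      rw [PySem.Set.ofList_eq_foldl, PySem.Set.ofList_eq_foldl, List.foldl_append]
      rfl
    by_cases hx : x ∈ m
    · have h1 : PySem.Set.add (PySem.Set.ofList m) x = PySem.Set.ofList m := by
        simp [PySem.Set.add, PySem.Set.mem_ofList, hx]
      by_cases hp : p x
      · have hx' : x ∈ m.filter p := List.mem_filter.mpr ⟨hx, hp⟩
        have h2 : PySem.Set.add (PySem.Set.ofList (m.filter p)) x = PySem.Set.ofList (m.filter p) := by
          simp [PySem.Set.add, PySem.Set.mem_ofList, hx']
        simp [hof, List.filter_append, hp, h1, h2, ih]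
      · simp [hof, List.filter_append, hp, h1, ih]
    · have h1 : PySem.Set.add (PySem.Set.ofList m) x = PySem.Set.ofList m ++ [x] := by
        simp [PySem.Set.add, PySem.Set.mem_ofList, hx]
      by_cases hp : p x
      · have hx' : x ∉ m.filter p := fun hc => hx (List.mem_filter.mp hc).1
        have h2 : PySem.Set.add (PySem.Set.ofList (m.filter p)) x = PySem.Set.ofList (m.filter p) ++ [x] := by
          simp [PySem.Set.add, PySem.Set.mem_ofList, hx']
        simp [hof, List.filter_append, hp, h1, h2, ih]
      · simp [hof, List.filter_append, hp, h1, ih]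

-- x ∈ set(r) tested on the 1-char string of c agrees with Python's 'c in r'
theorem gp_contains_toSet (r : String) (c : Char) :
    (gpToSet r).contains (String.ofList [c]) = PySem.Str.isIn (String.ofList [c]) r := by
  have hmem : String.ofList [c] ∈ r.toList.map (fun d => String.ofList [d]) ↔ c ∈ r.toList := by
    constructor
    · rintro h
      rcases List.mem_map.mp h with ⟨d, hd, he⟩
      have : ([c] : List Char) = [d] := by
        have := congrArg String.toList he
        simpa using this.symm
      simp at this
      simpa [this] using hd
    · intro h
      exact List.mem_map.mpr ⟨c, h, rfl⟩
  by_cases h : c ∈ r.toList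
  · have h1 : (gpToSet r).contains (String.ofList [c]) = true := by
      simp [gpToSet, PySem.Set.mem_ofList, hmem, h]
    have h2 : PySem.Str.isIn (String.ofList [c]) r = true := by
      rw [PySem.Str.isIn_iff_infix]
      simpa [List.singleton_infix_iff] using h
    rw [h1, h2]
  · have h1 : (gpToSet r).contains (String.ofList [c]) = false := by
      simp [gpToSet, PySem.Set.mem_ofList, hmem, h]
    have h2 : PySem.Str.isIn (String.ofList [c]) r = false := by
      rw [← Bool.not_eq_true, PySem.Str.isIn_iff_infix]
      simpa [List.singleton_infix_iff] using h
    rw [h1, h2]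

-- per segment: A's reduce-intersection equals B's filtered comprehension
theorem gp_seg (seg : List String) : gpF seg = gpCommon seg := by
  cases seg with
  | nil => rfl
  | cons r0 rest =>
    show (rest.map gpToSet).foldl PySem.Set.inter (gpToSet r0) = _
    rw [gp_foldl_inter]
    show (PySem.Set.ofList (r0.toList.map (fun c => String.ofList [c]))).filter _ = _
    rw [gp_ofList_filter, List.filter_map]
    refine congrArg PySem.Set.ofList (congrArg (List.map (fun c => String.ofList [c])) (List.filter_congr ?_))
    intro c _
    rw [Function.comp_apply, List.all_map]
    exact congrArg rest.all (funext fun r => gp_contains_toSet r c)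

-- accumulator of gpSplit factors out
theorem gp_split_acc (xs : List String) : ∀ (segs : List (List String)) (seg : List String),
    gpSplit xs segs seg = segs ++ gpSplit xs [] seg := by
  induction xs with
  | nil => intro segs seg; simp [gpSplit]
  | cons row rs ih =>
    intro segs seg
    by_cases h : row.toList = []
    · have e : ∀ a b, gpSplit (row :: rs) a b = gpSplit rs (a ++ [b]) [] :=
        fun a b => by simp [gpSplit, h]
      rw [e, e, List.nil_append, ih (segs ++ [seg]) [], ih [seg] []]
      simp
    · have e : ∀ a b, gpSplit (row :: rs) a b = gpSplit rs a (b ++ [row]) :=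
        fun a b => by simp [gpSplit, h]
      rw [e, e, ih segs (seg ++ [row])]

theorem gp_split_none (xs : List String) : ∀ (seg : List String), ("" : String) ∉ xs →
    gpSplit xs [] seg = [seg ++ xs] := by
  induction xs with
  | nil => intro seg _; simp [gpSplit]
  | cons row rs ih =>
    intro seg h
    have hrow : row ≠ "" := fun hr => h (by simp [hr])
    have hrow' : row.toList ≠ [] := fun hc => hrow (String.toList_eq_nil_iff.mp hc)
    rw [gpSplit, if_pos hrow', ih (seg ++ [row]) (fun hc => h (List.mem_cons_of_mem _ hc))]
    simp

theorem gp_split_some (xs : List String) : ∀ (i : Nat) (seg : List String),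
    PySem.List.index? xs "" = some i →
    gpSplit xs [] seg = (seg ++ xs.take i) :: gpSplit (xs.drop (i + 1)) [] [] := by
  induction xs with
  | nil => intro i seg h; simp [PySem.List.index?_eq_idxOf?] at h
  | cons row rs ih =>
    intro i seg h
    by_cases hrow : row = ""
    · subst hrow
      rw [PySem.List.index?_cons_self] at h
      obtain rfl : i = 0 := by simpa using h.symm
      rw [show gpSplit ("" :: rs) [] seg = gpSplit rs ([] ++ [seg]) [] from by simp [gpSplit]]
      rw [List.nil_append, gp_split_acc]
      simp
    · rw [PySem.List.index?_cons_of_ne rs hrow] at h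
      rcases Option.map_eq_some_iff.mp h with ⟨j, hj, hji⟩
      have hrow' : row.toList ≠ [] := fun hc => hrow (String.toList_eq_nil_iff.mp hc)
      rw [gpSplit, if_pos hrow', ih j (seg ++ [row]) hj]
      subst hji
      simp [List.take_succ_cons, List.drop_succ_cons]

-- main: A's segments mapped through gpF equal B's recursion, on all inputs
theorem gp_main (n : Nat) : ∀ (xs : List String), xs.length ≤ n →
    (gpSplit xs [] []).map gpF = group_partition_alt xs := by
  induction n with
  | zero =>
    intro xs hlen
    obtain rfl : xs = [] := List.eq_nil_of_length_eq_zero (Nat.le_zero.mp hlen)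
    rw [group_partition_alt]
    simp [gpSplit, gpF, gpReduce, gpCommon, PySem.List.index?_eq_idxOf?]
  | succ n ih =>
    intro xs hlen
    rw [group_partition_alt]
    split
    next i h =>
      have hmem : ("" : String) ∈ xs :=
        (PySem.List.index?_isSome_iff xs "").mp (by rw [h]; rfl)
      have hpos : 0 < xs.length := List.length_pos_of_mem hmem
      rw [gp_split_some xs i [] h]
      have hc : ((i : Int) + 1) = (((i + 1 : Nat)) : Int) := by push_cast; ring
      rw [List.map_cons, hc, PySem.List.slice_from_natCast, PySem.List.slice_to_natCast]
      rw [ih (xs.drop (i + 1)) (by simp; omega)]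
      simp [gp_seg]
    next h =>
      rw [gp_split_none xs [] ((PySem.List.index?_eq_none_iff xs "").mp h)]
      simp [gp_seg]

-- ===== VERDICT (by name: the statement is the Claim_ definition above) =====
theorem group_partition_spec : Claim_equal_group_partition := by
  intro raw_input _ _
  unfold Spec_group_partition group_partition
  rw [← gp_main raw_input.length raw_input (le_refl _), ← gp_key]
  rfl
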